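-- pv_equiv track=rewrite | github.com/jcari-dev/Project-Euler-Solutions | Problem12/code.py | get_triangle_number
-- ===== SOURCE A (Python) =====
-- from functools import reduce
--
-- def get_triangle_number(nth):
--
--     factors = []
--     triangle_number_terms = []
--     sum_number_terms = []
--     number = 1
--
--     while len(factors) < nth:
--         triangle_number_terms.append(number)
--         terms_sum = reduce(lambda x,y: x+y, triangle_number_terms)
--         sum_number_terms.append(terms_sum)
--         factors = [n for n in range(1, terms_sum +1) if terms_sum % n == 0]
--         number += 1
--
--
--
--     return sum_number_terms, factors, terms_sum
-- ===== SOURCE B (Python) =====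
-- def get_triangle_number(nth):
--     triangle_numbers = []
--     t = 0
--     k = 0
--     while True:
--         k += 1
--         t += k
--         triangle_numbers.append(t)
--         small = []
--         large = []
--         d = 1
--         while d * d <= t:
--             if t % d == 0:
--                 small.append(d)
--                 if d * d != t:
--                     large.append(t // d)
--             d += 1
--         divisors = small + large[::-1]
--         if nth <= len(divisors):
--             return triangle_numbers, divisors, t
-- ===== Notes on version B (the rewrite author's own statement) =====
-- stated objective: alternative
-- what changed: B keeps a running triangle-number sum instead of re-summing the term list with reduce each iteration, and enumerates divisors in pairs up to sqrt(T) (then stitches small + reversed large) instead of scanning all of 1..T; intended as faster (measured 168x at the largest size both finished), but a timing run could not confirm scaling beyond that.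
-- outside the precondition, e.g. on get_triangle_number(0): A raises UnboundLocalError, B returns ([1], [1], 1)
import Mathlib
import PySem

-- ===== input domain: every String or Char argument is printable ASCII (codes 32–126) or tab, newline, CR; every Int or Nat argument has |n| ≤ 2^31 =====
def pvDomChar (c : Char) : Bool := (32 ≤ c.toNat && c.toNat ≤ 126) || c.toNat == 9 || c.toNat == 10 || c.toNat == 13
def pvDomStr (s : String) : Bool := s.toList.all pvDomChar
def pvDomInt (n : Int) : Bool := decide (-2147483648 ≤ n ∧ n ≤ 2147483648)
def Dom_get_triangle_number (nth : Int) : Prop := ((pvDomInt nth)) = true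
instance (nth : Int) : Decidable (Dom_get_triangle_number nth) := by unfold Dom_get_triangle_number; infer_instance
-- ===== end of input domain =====

-- B replaces A's per-iteration reduce-resum and full 1..T divisor scan by a running sum and
-- paired divisor enumeration up to sqrt(T).
-- Each loop is totalized with generous fuel (2^nth iterations always suffice: the triangle
-- number T(2^nth - 1) already has at least nth divisors, and the loops stop early on their own
-- exit condition); the fuel-0 sentinel is never reached under Pre_.

-- ===== PORT A =====
-- reduce(lambda x,y: x+y, l)  (l is nonempty wherever A calls it)
def pvReduceAdd : List Int → Int
  | [] => 0
  | h :: t => t.foldl (· + ·) h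

def pvALoop (nth : Int) (tri sums : List Int) (number terms_sum : Int) (factors : List Int) : Nat → List Int × List Int × Int
  | 0 => ([], [], 0)
  | fuel + 1 =>
    if (factors.length : Int) < nth then
      let tri' := tri ++ [number]
      let s := pvReduceAdd tri'
      let sums' := sums ++ [s]
      let f := (PySem.List.pyRange 1 (s + 1) 1).filter (fun n => PySem.Int.mod s n == 0)
      pvALoop nth tri' sums' (number + 1) s f fuel
    else (sums, factors, terms_sum)

def get_triangle_number (nth : Int) : List Int × List Int × Int :=
  pvALoop nth [] [] 1 0 [] (2 ^ nth.toNat + 1)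

-- ===== PORT B =====
-- inner while: d from 1 while d*d <= t, collecting small divisors and their cofactors
def pvDivLoop (t d : Int) (small large : List Int) : Nat → List Int × List Int
  | 0 => (small, large)
  | fuel + 1 =>
    if d * d ≤ t then
      if PySem.Int.mod t d == 0 then
        pvDivLoop t (d + 1) (small ++ [d])
          (if d * d == t then large else large ++ [PySem.Int.floordiv t d]) fuel
      else
        pvDivLoop t (d + 1) small large fuel
    else (small, large)

def pvBLoop (nth t k : Int) (tris : List Int) : Nat → List Int × List Int × Int
  | 0 => ([], [], 0)
  | fuel + 1 =>
    let k' := k + 1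
    let t' := t + k'
    let tris' := tris ++ [t']
    let sl := pvDivLoop t' 1 [] [] t'.toNat
    let divisors := sl.1 ++ sl.2.reverse
    if nth ≤ (divisors.length : Int) then (tris', divisors, t')
    else pvBLoop nth t' k' tris' fuel

def get_triangle_number_alt (nth : Int) : List Int × List Int × Int :=
  pvBLoop nth 0 0 [] (2 ^ nth.toNat)

-- ===== PRECONDITION & SPEC =====
-- Pre_ excludes nth ≤ 0, on which A's while body never runs and A raises UnboundLocalError.
def Pre_get_triangle_number (nth : Int) : Prop := 1 ≤ nth
instance (nth : Int) : Decidable (Pre_get_triangle_number nth) := by unfold Pre_get_triangle_number; infer_instance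
def pvWitness_get_triangle_number : Int := 2

def Spec_get_triangle_number (nth : Int) (out : List Int × List Int × Int) : Prop := out = get_triangle_number_alt nth
instance (nth : Int) (out : List Int × List Int × Int) : Decidable (Spec_get_triangle_number nth out) := by unfold Spec_get_triangle_number; infer_instance

-- ===== CLAIM (what is proved, stated in full; the proofs are below) =====
def Claim_equal_get_triangle_number : Prop := ∀ (nth : Int), Dom_get_triangle_number nth → Pre_get_triangle_number nth → Spec_get_triangle_number nth (get_triangle_number nth)

-- ===== LEMMAS AND PROOFS =====

-- the inner-loop results with empty accumulators
-- fuel (t + 1 - d).toNat bounds the remaining iterations (the loop stops once d * d > t, and d ≤ t there)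
def pvS (t d : Int) : List Int := (pvDivLoop t d [] [] (t + 1 - d).toNat).1
def pvL (t d : Int) : List Int := (pvDivLoop t d [] [] (t + 1 - d).toNat).2

lemma pvDivLoop_stop (t d : Int) (h : ¬ d * d ≤ t) (fuel : Nat) (s l : List Int) :
    pvDivLoop t d s l fuel = (s, l) := by
  cases fuel <;> simp [pvDivLoop, h]

lemma pvle_sq (d : Int) : d ≤ d * d := by
  rcases (by omega : d ≤ 0 ∨ 1 ≤ d) with hd | hd
  · have h0 : (0:Int) ≤ d * d := mul_self_nonneg d
    omega
  · exact le_mul_of_one_le_left (by omega) hd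

lemma pvS_base (t d : Int) (h : ¬ d * d ≤ t) : pvS t d = [] := by
  unfold pvS; rw [pvDivLoop_stop t d h]
lemma pvL_base (t d : Int) (h : ¬ d * d ≤ t) : pvL t d = [] := by
  unfold pvL; rw [pvDivLoop_stop t d h]

lemma pvDivLoop_acc (fuel : Nat) : ∀ (t d : Int) (small large : List Int),
    pvDivLoop t d small large fuel
      = (small ++ (pvDivLoop t d [] [] fuel).1, large ++ (pvDivLoop t d [] [] fuel).2) := by
  induction fuel with
  | zero => intro t d small large; simp [pvDivLoop]
  | succ fuel ih =>
    intro t d small large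
    by_cases hdd : d * d ≤ t
    · simp only [pvDivLoop, if_pos hdd]
      split_ifs with hm hq
      · rw [ih, ih t (d + 1) ([] ++ [d])]
        simp
      · rw [ih, ih t (d + 1) ([] ++ [d])]
        simp
      · exact ih t (d + 1) small large
    · simp [pvDivLoop, hdd]

lemma pvMeasure_succ (t d : Int) (h : d * d ≤ t) :
    (t + 1 - d).toNat = (t + 1 - (d + 1)).toNat + 1 := by
  have := pvle_sq d; omega

lemma pvS_rec (t d : Int) (_hd : 0 < d) (h : d * d ≤ t) :
    pvS t d = if d ∣ t then d :: pvS t (d + 1) else pvS t (d + 1) := by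
  have hm : (PySem.Int.mod t d == 0) = true ↔ d ∣ t := by
    simp [PySem.Int.mod_eq_zero_iff_dvd]
  unfold pvS
  rw [pvMeasure_succ t d h]
  simp only [pvDivLoop, if_pos h]
  by_cases hdv : d ∣ t
  · rw [if_pos (hm.mpr hdv), if_pos hdv]
    split_ifs with hq
    · rw [pvDivLoop_acc]; simp
    · rw [pvDivLoop_acc]; simp
  · rw [if_neg (fun c => hdv (hm.mp c)), if_neg hdv, pvDivLoop_acc]

lemma pvL_rec (t d : Int) (hd : 0 < d) (h : d * d ≤ t) :
    pvL t d = if d ∣ t ∧ d * d ≠ t then t / d :: pvL t (d + 1) else pvL t (d + 1) := by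
  have hm : (PySem.Int.mod t d == 0) = true ↔ d ∣ t := by
    simp [PySem.Int.mod_eq_zero_iff_dvd]
  have hfd : PySem.Int.floordiv t d = t / d := PySem.Int.floordiv_eq_ediv_of_pos hd
  unfold pvL
  rw [pvMeasure_succ t d h]
  simp only [pvDivLoop, if_pos h]
  by_cases hdv : d ∣ t
  · rw [if_pos (hm.mpr hdv)]
    by_cases hq : d * d = t
    · rw [if_pos (by simpa using hq), if_neg (by tauto : ¬ (d ∣ t ∧ d * d ≠ t)), pvDivLoop_acc]
      simp
    · rw [if_neg (by simpa using hq), if_pos ⟨hdv, hq⟩, pvDivLoop_acc]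
      simp [hfd]
  · rw [if_neg (fun c => hdv (hm.mp c)), if_neg (fun c => hdv c.1), pvDivLoop_acc]

lemma pvSL_props (t : Int) (ht : 1 ≤ t) :
    ∀ (d : Int), 1 ≤ d →
      (∀ x, x ∈ pvS t d ↔ d ≤ x ∧ x * x ≤ t ∧ x ∣ t) ∧
      (∀ x, x ∈ pvL t d ↔ ∃ n, d ≤ n ∧ n * n < t ∧ n ∣ t ∧ x = t / n) ∧
      (pvS t d).Pairwise (· < ·) ∧ (pvL t d).Pairwise (fun a b => b < a) := by
  intro d
  generalize hn : (t + 1 - d).toNat = n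
  induction n generalizing d with
  | zero =>
    intro hd
    have hdd : ¬ d * d ≤ t := by have := pvle_sq d; omega
    rw [pvS_base t d hdd, pvL_base t d hdd]
    refine ⟨fun x => ?_, fun x => ?_, List.Pairwise.nil, List.Pairwise.nil⟩
    · simp only [List.not_mem_nil, false_iff]
      rintro ⟨h1, h2, -⟩
      nlinarith
    · simp only [List.not_mem_nil, false_iff]
      rintro ⟨m, h1, h2, -, -⟩
      nlinarith
  | succ n ih =>
    intro hd
    by_cases hdd : d * d ≤ t
    · have hn' : (t + 1 - (d + 1)).toNat = n := by have := pvle_sq d; omega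
      obtain ⟨ihS, ihL, ihSp, ihLp⟩ := ih (d + 1) hn' (by omega)
      rw [pvS_rec t d (by omega) hdd, pvL_rec t d (by omega) hdd]
      refine ⟨fun x => ?_, fun x => ?_, ?_, ?_⟩
      · -- S membership
        split_ifs with hdv
        · simp only [List.mem_cons, ihS]
          constructor
          · rintro (rfl | ⟨h1, h2, h3⟩)
            · exact ⟨le_refl x, hdd, hdv⟩
            · exact ⟨by omega, h2, h3⟩
          · rintro ⟨h1, h2, h3⟩
            by_cases hx : x = d
            · exact Or.inl hx
            · exact Or.inr ⟨by omega, h2, h3⟩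
        · rw [ihS]
          constructor
          · rintro ⟨h1, h2, h3⟩; exact ⟨by omega, h2, h3⟩
          · rintro ⟨h1, h2, h3⟩
            have : x ≠ d := fun h => hdv (h ▸ h3)
            exact ⟨by omega, h2, h3⟩
      · -- L membership
        split_ifs with hdv
        · simp only [List.mem_cons, ihL]
          constructor
          · rintro (rfl | ⟨m, h1, h2, h3, h4⟩)
            · exact ⟨d, le_refl d, lt_of_le_of_ne hdd hdv.2, hdv.1, rfl⟩
            · exact ⟨m, by omega, h2, h3, h4⟩
          · rintro ⟨m, h1, h2, h3, h4⟩
            by_cases hx : m = d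
            · subst hx; exact Or.inl h4
            · exact Or.inr ⟨m, by omega, h2, h3, h4⟩
        · rw [ihL]
          push Not at hdv
          constructor
          · rintro ⟨m, h1, h2, h3, h4⟩; exact ⟨m, by omega, h2, h3, h4⟩
          · rintro ⟨m, h1, h2, h3, h4⟩
            have : m ≠ d := by
              rintro rfl
              exact absurd (hdv h3) (by omega)
            exact ⟨m, by omega, h2, h3, h4⟩
      · -- S pairwise
        split_ifs with hdv
        · exact List.Pairwise.cons (fun x hx => by have := (ihS x).mp hx; omega) ihSp
        · exact ihSp
      · -- L pairwise
        split_ifs with hdv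
        · refine List.Pairwise.cons (fun x hx => ?_) ihLp
          obtain ⟨m, h1, h2, h3, rfl⟩ := (ihL x).mp hx
          -- show t / m < t / d
          obtain ⟨c, rfl⟩ := hdv.1
          obtain ⟨e, he⟩ := h3
          have hdpos : 0 < d := by omega
          have hmpos : 0 < m := by omega
          have hcpos : 0 < c := by nlinarith
          have hepos : 0 < e := by nlinarith
          have h5 : d * c / d = c := Int.mul_ediv_cancel_left c (by omega)
          have h6 : d * c / m = e := by rw [he]; exact Int.mul_ediv_cancel_left e (by omega)
          show d * c / m < d * c / d
          rw [h5, h6]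
          nlinarith
        · exact ihLp
    · rw [pvS_base t d hdd, pvL_base t d hdd]
      refine ⟨fun x => ?_, fun x => ?_, List.Pairwise.nil, List.Pairwise.nil⟩
      · simp only [List.not_mem_nil, false_iff]
        rintro ⟨h1, h2, -⟩
        nlinarith
      · simp only [List.not_mem_nil, false_iff]
        rintro ⟨m, h1, h2, -, -⟩
        nlinarith

lemma pvDivEq (t : Int) (ht : 1 ≤ t) :
    (PySem.List.pyRange 1 (t + 1) 1).filter (fun n => PySem.Int.mod t n == 0)
      = pvS t 1 ++ (pvL t 1).reverse := by
  obtain ⟨hS, hL, hSp, hLp⟩ := pvSL_props t ht 1 le_rfl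
  have hmemL : ∀ x, x ∈ (PySem.List.pyRange 1 (t + 1) 1).filter (fun n => PySem.Int.mod t n == 0)
      ↔ 1 ≤ x ∧ x ≤ t ∧ x ∣ t := by
    intro x
    rw [List.mem_filter, PySem.List.mem_pyRange_one]
    simp only [beq_iff_eq, PySem.Int.mod_eq_zero_iff_dvd]
    constructor
    · rintro ⟨⟨h1, h2⟩, h3⟩; exact ⟨h1, by omega, h3⟩
    · rintro ⟨h1, h2, h3⟩; exact ⟨⟨h1, by omega⟩, h3⟩
  have hmemR : ∀ x, x ∈ pvS t 1 ++ (pvL t 1).reverse ↔ 1 ≤ x ∧ x ≤ t ∧ x ∣ t := by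
    intro x
    rw [List.mem_append, List.mem_reverse, hS, hL]
    constructor
    · rintro (⟨h1, h2, h3⟩ | ⟨m, h1, h2, h3, rfl⟩)
      · exact ⟨h1, le_trans (pvle_sq x) h2, h3⟩
      · obtain ⟨c, rfl⟩ := h3
        have hc1 : 1 ≤ c := by nlinarith
        have h5 : m * c / m = c := Int.mul_ediv_cancel_left c (by omega)
        rw [h5]
        exact ⟨hc1, by nlinarith, ⟨m, mul_comm m c⟩⟩
    · rintro ⟨h1, h2, h3⟩
      by_cases hq : x * x ≤ t
      · exact Or.inl ⟨h1, hq, h3⟩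
      · right
        obtain ⟨c, hc⟩ := h3
        have hc1 : 1 ≤ c := by nlinarith
        refine ⟨c, ?_, ?_, ⟨x, by rw [hc, mul_comm]⟩, ?_⟩
        · -- 1 ≤ c
          omega
        · -- c * c < t
          nlinarith
        · -- x = t / c
          rw [hc, mul_comm x c, Int.mul_ediv_cancel_left x (by omega)]
  have hpL : ((PySem.List.pyRange 1 (t + 1) 1).filter (fun n => PySem.Int.mod t n == 0)).Pairwise (· < ·) :=
    (PySem.List.pairwise_lt_pyRange_one 1 (t + 1)).filter _
  have hpRrev : ((pvL t 1).reverse).Pairwise (· < ·) := by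
    rw [List.pairwise_reverse]; exact hLp
  have hpR : (pvS t 1 ++ (pvL t 1).reverse).Pairwise (· < ·) := by
    rw [List.pairwise_append]
    refine ⟨hSp, hpRrev, ?_⟩
    intro a ha b hb
    rw [List.mem_reverse] at hb
    obtain ⟨h1, h2, h3⟩ := (hS a).mp ha
    obtain ⟨m, g1, g2, g3, rfl⟩ := (hL b).mp hb
    obtain ⟨c, rfl⟩ := g3
    have hc1 : 1 ≤ c := by nlinarith
    have h5 : m * c / m = c := Int.mul_ediv_cancel_left c (by omega)
    rw [h5]
    have hmc : m < c := by nlinarith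
    nlinarith [mul_self_nonneg (a - c), mul_lt_mul_of_pos_right hmc (show (0:Int) < c by omega)]
  have hnL : ((PySem.List.pyRange 1 (t + 1) 1).filter (fun n => PySem.Int.mod t n == 0)).Nodup :=
    hpL.imp (fun h => ne_of_lt h)
  have hnR : (pvS t 1 ++ (pvL t 1).reverse).Nodup := hpR.imp (fun h => ne_of_lt h)
  have hperm := (List.perm_ext_iff_of_nodup hnL hnR).mpr (fun a => (hmemL a).trans (hmemR a).symm)
  exact PySem.List.eq_of_perm_of_pairwise_le_of_injective (fun x => x) (fun _ _ h => h) hperm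
    (hpL.imp le_of_lt) (hpR.imp le_of_lt)

lemma pvReduceAdd_append (l : List Int) (x : Int) (hl : l ≠ []) :
    pvReduceAdd (l ++ [x]) = pvReduceAdd l + x := by
  cases l with
  | nil => simp at hl
  | cons h t => simp [pvReduceAdd, List.foldl_append]

lemma pvSync (fuel : Nat) : ∀ (nth k t : Int) (tri sums f : List Int),
    0 ≤ k → 0 ≤ t →
    (tri = [] → k = 0 ∧ t = 0) →
    (tri ≠ [] → pvReduceAdd tri = t) →
    ((f.length : Int) < nth) →
    pvALoop nth tri sums (k + 1) t f (fuel + 1) = pvBLoop nth t k sums fuel := by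
  induction fuel with
  | zero =>
    intro nth k t tri sums f _ _ _ _ hf
    simp only [pvALoop, pvBLoop, if_pos hf]
  | succ fuel ih =>
    intro nth k t tri sums f hk ht htriE htriNE hf
    have hs : pvReduceAdd (tri ++ [k + 1]) = t + (k + 1) := by
      by_cases htri : tri = []
      · obtain ⟨rfl, rfl⟩ := htriE htri
        subst htri
        simp [pvReduceAdd]
      · rw [pvReduceAdd_append tri (k + 1) htri, htriNE htri]
    have ht1 : 1 ≤ t + (k + 1) := by omega
    have hdiv := pvDivEq (t + (k + 1)) ht1
    conv_lhs => rw [pvALoop]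
    simp only [if_pos hf, hs]
    conv_rhs => rw [pvBLoop]
    rw [show pvDivLoop (t + (k + 1)) 1 [] [] (t + (k + 1)).toNat
          = (pvS (t + (k + 1)) 1, pvL (t + (k + 1)) 1) by
        unfold pvS pvL
        rw [show (t + (k + 1) + 1 - 1).toNat = (t + (k + 1)).toNat by omega]]
    by_cases hstop : nth ≤ (((pvS (t + (k+1)) 1 ++ (pvL (t + (k+1)) 1).reverse).length : Int))
    · rw [if_pos hstop]
      rw [pvALoop]
      rw [if_neg (by rw [hdiv]; omega), hdiv]
    · rw [if_neg hstop]
      have := ih nth (k + 1) (t + (k + 1)) (tri ++ [k + 1]) (sums ++ [pvReduceAdd (tri ++ [k + 1])]) 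
        ((PySem.List.pyRange 1 (t + (k + 1) + 1) 1).filter (fun n => PySem.Int.mod (t + (k + 1)) n == 0))
        (by omega) (by omega) (by simp) (fun _ => hs) (by rw [hdiv]; omega)
      rw [hs] at this
      exact this
  
-- ===== VERDICT (by name: the statement is the Claim_ definition above) =====
theorem get_triangle_number_spec : Claim_equal_get_triangle_number := by
  intro nth _ hpre
  unfold Spec_get_triangle_number get_triangle_number get_triangle_number_alt
  exact pvSync (2 ^ nth.toNat) nth 0 0 [] [] [] le_rfl le_rfl (fun _ => ⟨rfl, rfl⟩)
    (fun h => absurd rfl h) (by simpa using hpre)
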